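-- pv_equiv track=rewrite | github.com/LiTing99-cutie/sORFs | 08-Iso-seq-20250717/scripts/custom.db.20250825.v2.py | attrs_str
-- ===== SOURCE A (Python) =====
-- def attrs_str(d: dict) -> str:
--     keys_order = ["gene_id", "transcript_id", "gene_name", "transcript_name",
--                   "source_transcript", "source_gene", "orf_status", "fail_reason", "note"]
--     seen = set()
--     items = []
--     for k in keys_order:
--         if k in d:
--             items.append(f'{k} "{d[k]}"'); seen.add(k)
--     for k, v in d.items():
--         if k in seen: continue
--         items.append(f'{k} "{v}"')
--     return "; ".join(items) + ";"
-- ===== SOURCE B (Python) =====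
-- def attrs_str(d: dict) -> str:
--     keys_order = ["gene_id", "transcript_id", "gene_name", "transcript_name",
--                   "source_transcript", "source_gene", "orf_status", "fail_reason", "note"]
--     rank = {k: i for i, k in enumerate(keys_order)}
--     ordered = sorted(d, key=lambda k: rank.get(k, len(keys_order)))
--     return "; ".join(f'{k} "{d[k]}"' for k in ordered) + ";"
-- ===== Notes on version B (the rewrite author's own statement) =====
-- stated objective: simpler
-- what changed: Replaces A's two filtered passes with a seen set by a single stable sort of the dict's keys under a rank table (known keys get their keys_order index, unknown keys a common maximal rank, so stability keeps their insertion order), then one join.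
import Mathlib
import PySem

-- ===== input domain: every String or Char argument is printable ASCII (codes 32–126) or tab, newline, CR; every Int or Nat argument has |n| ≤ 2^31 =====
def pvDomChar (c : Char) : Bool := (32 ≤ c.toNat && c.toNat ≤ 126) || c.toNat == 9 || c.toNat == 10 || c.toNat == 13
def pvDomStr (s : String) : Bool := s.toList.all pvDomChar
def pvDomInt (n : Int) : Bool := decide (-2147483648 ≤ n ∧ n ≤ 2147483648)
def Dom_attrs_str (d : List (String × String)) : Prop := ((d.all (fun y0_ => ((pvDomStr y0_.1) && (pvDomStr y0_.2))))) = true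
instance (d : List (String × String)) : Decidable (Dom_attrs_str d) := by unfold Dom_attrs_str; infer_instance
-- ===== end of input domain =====

-- B replaces A's two filtered passes over keys_order/d with one stable rank-keyed sort of the dict's keys; same output, proved for all inputs.


-- ===== PORT A =====
-- the literal keys_order list both Pythons define
def pvKeysOrder : List String :=
  ["gene_id", "transcript_id", "gene_name", "transcript_name",
   "source_transcript", "source_gene", "orf_status", "fail_reason", "note"]

-- the f-string f'{k} "{v}"'
def pvFmt (k v : String) : String := k ++ " \"" ++ v ++ "\""

def attrs_str (d : List (String × String)) : String :=
  let dd := PySem.Dict.ofList d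
  let st := pvKeysOrder.foldl
    (fun (st : PySem.Set String × List String) k =>
      if dd.contains k then (st.1.add k, st.2 ++ [pvFmt k (dd.getD k "")]) else st)
    (([] : PySem.Set String), ([] : List String))
  let items := dd.items.foldl
    (fun (acc : List String) kv =>
      if st.1.contains kv.1 then acc else acc ++ [pvFmt kv.1 kv.2]) st.2
  PySem.Str.join "; " items ++ ";"

def attrs_str_alt (d : List (String × String)) : String :=
  let dd := PySem.Dict.ofList d
  let rank : PySem.Dict String Int :=
    PySem.Dict.ofList ((PySem.List.enumerate pvKeysOrder 0).map (fun p => (p.2, p.1)))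
  let ordered := PySem.List.sorted dd.keys (fun k => rank.getD k (pvKeysOrder.length : Int)) false
  PySem.Str.join "; " (ordered.map (fun k => pvFmt k (dd.getD k ""))) ++ ";"


-- ===== PRECONDITION & SPEC =====
def Spec_attrs_str (d : List (String × String)) (out : String) : Prop := out = attrs_str_alt d
instance (d : List (String × String)) (out : String) : Decidable (Spec_attrs_str d out) := by unfold Spec_attrs_str; infer_instance

-- ===== CLAIM (what is proved, stated in full; the proofs are below) =====
def Claim_equal_attrs_str : Prop := ∀ (d : List (String × String)), Dom_attrs_str d → Spec_attrs_str d (attrs_str d)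

-- ===== LEMMAS AND PROOFS =====

-- B's sort key 'rank.get(k, len(keys_order))', named for the proofs
def pvRk (k : String) : Int :=
  (PySem.Dict.ofList ((PySem.List.enumerate pvKeysOrder 0).map (fun p => (p.2, p.1)))).getD k (pvKeysOrder.length : Int)

theorem pvRk_lt_of_mem (k : String) (h : k ∈ pvKeysOrder) : pvRk k < 9 := by
  simp only [pvKeysOrder, List.mem_cons, List.not_mem_nil, or_false] at h
  rcases h with h|h|h|h|h|h|h|h|h <;> subst h <;> decide


theorem pvRk_of_not_mem (k : String) (h : k ∉ pvKeysOrder) : pvRk k = 9 := by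
  have hkeys : (PySem.Dict.ofList ((PySem.List.enumerate pvKeysOrder 0).map (fun p => (p.2, p.1)))).keys = pvKeysOrder := by decide
  have hc : (PySem.Dict.ofList ((PySem.List.enumerate pvKeysOrder 0).map (fun p => (p.2, p.1)))).contains k = false := by
    rw [← Bool.not_eq_true]
    intro hct
    exact h (hkeys ▸ (PySem.Dict.contains_iff_mem_keys _ k).mp hct)
  rw [pvRk, PySem.Dict.getD_of_not_contains _ _ hc]
  decide

theorem insertBy_of_forall_before {α : Type} (before : α → α → Bool) (x : α) (ys : List α)
    (h : ∀ y ∈ ys, before x y = true) : PySem.List.insertBy before x ys = x :: ys := by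
  cases ys with
  | nil => rfl
  | cons y t => simp [PySem.List.insertBy, h y (by simp)]

theorem ins_mem (r : String → Int) (k : String) :
    ∀ (KO : List String) (p : String → Bool) (B : List String),
      KO.Pairwise (fun a b => r a < r b) → k ∈ KO → p k = false → (∀ y ∈ B, r k < r y) →
      PySem.List.insertBy (fun a b => decide (r a < r b)) k (KO.filter p ++ B)
        = KO.filter (fun x => p x || x == k) ++ B := by
  intro KO
  induction KO with
  | nil => intro p B _ hk; simp at hk
  | cons c KO' ih =>
    intro p B hpw hk hpk hB
    have hpw' := (List.pairwise_cons.mp hpw).2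
    have hhead := (List.pairwise_cons.mp hpw).1
    by_cases hck : c = k
    · subst hck
      have hne : ∀ y ∈ KO', y ≠ c := fun y hy he =>
        absurd (he ▸ hhead y hy) (lt_irrefl _)
      have hfilt : KO'.filter (fun x => p x || x == c) = KO'.filter p := by
        apply List.filter_congr
        intro x hx
        simp [hne x hx]
      have hall : ∀ y ∈ KO'.filter p ++ B, (fun a b => decide (r a < r b)) c y = true := by
        intro y hy
        rcases List.mem_append.mp hy with hy | hy
        · exact decide_eq_true (hhead y (List.mem_of_mem_filter hy))
        · exact decide_eq_true (hB y hy)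
      have hstep : (c :: KO').filter p ++ B = KO'.filter p ++ B := by
        simp [hpk]
      rw [hstep, insertBy_of_forall_before _ _ _ hall]
      simp [hfilt]
    · have hk' : k ∈ KO' := by
        rcases List.mem_cons.mp hk with h | h
        · exact absurd h.symm hck
        · exact h
      have hrc : ¬ r k < r c := by have := hhead k hk'; omega
      by_cases hpc : p c = true
      · have : (c :: KO').filter p ++ B = c :: (KO'.filter p ++ B) := by
          simp [hpc]
        rw [this]
        have hstep : PySem.List.insertBy (fun a b => decide (r a < r b)) k (c :: (KO'.filter p ++ B))
            = c :: PySem.List.insertBy (fun a b => decide (r a < r b)) k (KO'.filter p ++ B) := by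
          simp [PySem.List.insertBy, hrc]
        rw [hstep, ih p B hpw' hk' hpk hB]
        simp [hpc]
      · have hpc' : p c = false := by simpa using hpc
        have h1 : (c :: KO').filter p = KO'.filter p := by simp [hpc']
        have h2 : (c :: KO').filter (fun x => p x || x == k) = KO'.filter (fun x => p x || x == k) := by
          simp [hpc', hck]
        rw [h1, h2, ih p B hpw' hk' hpk hB]

theorem sort_fold (r : String → Int) (KO : List String)
    (hpw : KO.Pairwise (fun a b => r a < r b))
    (h1 : ∀ y ∈ KO, r y < 9) (h2 : ∀ y : String, y ∉ KO → r y = 9) :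
    ∀ (ks pref : List String), (pref ++ ks).Nodup →
      ks.foldl (fun acc x => PySem.List.insertBy (fun a b => decide (r a < r b)) x acc)
          (KO.filter (fun y => decide (y ∈ pref)) ++ pref.filter (fun y => decide (y ∉ KO)))
        = KO.filter (fun y => decide (y ∈ pref ++ ks)) ++ (pref ++ ks).filter (fun y => decide (y ∉ KO)) := by
  intro ks
  induction ks with
  | nil => intro pref h; simp
  | cons x ks' ih =>
    intro pref hnd
    have hxp : x ∉ pref := by
      intro hx
      exact (List.disjoint_of_nodup_append hnd) hx (by simp)
    have hnd2 : ((pref ++ [x]) ++ ks').Nodup := by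
      simpa [List.append_assoc] using hnd
    rw [List.foldl_cons]
    by_cases hx : x ∈ KO
    · have hins := ins_mem r x KO (fun y => decide (y ∈ pref)) (pref.filter (fun y => decide (y ∉ KO)))
        hpw hx (by simp [hxp])
        (by
          intro y hy
          have hyKO : y ∉ KO := by
            have := List.of_mem_filter hy
            simpa using this
          rw [h2 y hyKO]
          exact h1 x hx)
      rw [hins]
      have e1 : KO.filter (fun y => decide (y ∈ pref) || y == x) = KO.filter (fun y => decide (y ∈ pref ++ [x])) := by
        apply List.filter_congr
        intro y _
        by_cases hyx : y = x <;> simp [List.mem_append, hyx]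
      have e2 : pref.filter (fun y => decide (y ∉ KO)) = (pref ++ [x]).filter (fun y => decide (y ∉ KO)) := by
        simp [List.filter_append, hx]
      rw [e1, e2, ih (pref ++ [x]) hnd2]
      simp [List.append_assoc]
    · have hall : ∀ y ∈ KO.filter (fun y => decide (y ∈ pref)) ++ pref.filter (fun y => decide (y ∉ KO)),
          (fun a b => decide (r a < r b)) x y = false := by
        intro y hy
        simp only [decide_eq_false_iff_not]
        rcases List.mem_append.mp hy with hy | hy
        · have := h1 y (List.mem_of_mem_filter hy)
          rw [h2 x hx]; omega
        · have hyKO : y ∉ KO := by simpa using List.of_mem_filter hy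
          rw [h2 x hx, h2 y hyKO]; omega
      rw [PySem.List.insertBy_of_forall_not_before _ _ _ hall]
      have e1 : KO.filter (fun y => decide (y ∈ pref)) = KO.filter (fun y => decide (y ∈ pref ++ [x])) := by
        apply List.filter_congr
        intro y hyKO
        have : y ≠ x := fun he => hx (he ▸ hyKO)
        simp [List.mem_append, this]
      have e2 : pref.filter (fun y => decide (y ∉ KO)) ++ [x] = (pref ++ [x]).filter (fun y => decide (y ∉ KO)) := by
        simp [List.filter_append, hx]
      rw [List.append_assoc, e1, e2, ih (pref ++ [x]) hnd2]
      simp [List.append_assoc]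

theorem loop1 (dd : PySem.Dict String String) :
    ∀ (l : List String) (s : PySem.Set String) (acc : List String),
      (∀ k ∈ l, k ∉ s) → l.Nodup →
      l.foldl (fun (st : PySem.Set String × List String) k =>
          if dd.contains k then (st.1.add k, st.2 ++ [pvFmt k (dd.getD k "")]) else st) (s, acc)
        = (s ++ l.filter (fun k => dd.contains k),
           acc ++ (l.filter (fun k => dd.contains k)).map (fun k => pvFmt k (dd.getD k ""))) := by
  intro l
  induction l with
  | nil => intro s acc _ _; simp
  | cons x t ih =>
    intro s acc hfresh hnd
    have hx : x ∉ s := hfresh x (by simp)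
    have hnd' := (List.nodup_cons.mp hnd).2
    have hxt : x ∉ t := (List.nodup_cons.mp hnd).1
    rw [List.foldl_cons]
    by_cases hc : dd.contains x
    · have hadd : s.add x = s ++ [x] := by
        simp [PySem.Set.add, List.contains_eq_mem, hx]
      simp only [hc, if_true, hadd]
      rw [ih (s ++ [x]) (acc ++ [pvFmt x (dd.getD x "")])
        (by
          intro k hk hmem
          rcases List.mem_append.mp hmem with h | h
          · exact hfresh k (List.mem_cons_of_mem _ hk) h
          · simp only [List.mem_singleton] at h
            exact hxt (h ▸ hk)) hnd']
      simp [hc, List.append_assoc]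
    · have hc' : dd.contains x = false := by simpa using hc
      simp only [hc', if_false, Bool.false_eq_true]
      rw [ih s acc (fun k hk => hfresh k (by simp [hk])) hnd']
      simp [hc']

theorem pv_main : ∀ d, attrs_str d = attrs_str_alt d := by
  intro d
  simp only [attrs_str, attrs_str_alt]
  set dd := PySem.Dict.ofList d with hdd
  have hnd : dd.keys.Nodup := PySem.Dict.nodup_keys_ofList d
  simp only [loop1 dd pvKeysOrder [] [] (by simp) (by decide), List.nil_append]
  set seen := pvKeysOrder.filter (fun k => dd.contains k) with hseen
  have hfun : (fun (acc : List String) (kv : String × String) =>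
      if PySem.Set.contains seen kv.1 then acc else acc ++ [pvFmt kv.1 kv.2])
      = (fun acc kv => if (!PySem.Set.contains seen kv.1) then acc ++ [pvFmt kv.1 kv.2] else acc) := by
    funext acc kv
    cases h : PySem.Set.contains seen kv.1 <;> simp
  simp only [hfun]
  rw [PySem.List.foldl_append_if, PySem.Dict.items_eq_map_keys dd hnd "",
      List.filter_map, List.map_map]
  have hkey : (fun k : String =>
      (PySem.Dict.ofList ((PySem.List.enumerate pvKeysOrder 0).map (fun p => (p.2, p.1)))).getD k (pvKeysOrder.length : Int)) = pvRk := rfl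
  rw [hkey, PySem.List.sorted_eq_foldl_insertBy]
  have hpw : pvKeysOrder.Pairwise (fun a b => pvRk a < pvRk b) := by decide
  have hstart : ([] : List String) =
      pvKeysOrder.filter (fun y => decide (y ∈ ([] : List String))) ++
        ([] : List String).filter (fun y => decide (y ∉ pvKeysOrder)) := by simp
  rw [show (List.foldl (fun acc x => PySem.List.insertBy (fun a b => decide (pvRk a < pvRk b)) x acc) [] dd.keys)
      = pvKeysOrder.filter (fun y => decide (y ∈ ([] : List String) ++ dd.keys)) ++
        (([] : List String) ++ dd.keys).filter (fun y => decide (y ∉ pvKeysOrder)) from by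
    rw [hstart]
    exact sort_fold pvRk pvKeysOrder hpw pvRk_lt_of_mem pvRk_of_not_mem dd.keys [] (by simpa using hnd)]
  simp only [List.nil_append, List.map_append, Function.comp_def]
  congr 2
  rw [hseen]
  congr 1
  · apply congrArg
    apply List.filter_congr
    intro k _
    rw [PySem.Dict.contains_eq_decide_mem_keys]
    rfl
  · apply congrArg
    apply List.filter_congr
    intro k hk
    have hc : dd.contains k = true := (PySem.Dict.contains_iff_mem_keys dd k).mpr hk
    by_cases hKO : k ∈ pvKeysOrder <;>
      simp [PySem.Set.contains, List.contains_eq_mem, List.mem_filter, hKO, hc]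

-- ===== VERDICT (by name: the statement is the Claim_ definition above) =====
theorem attrs_str_spec : Claim_equal_attrs_str := by
  intro d _
  unfold Spec_attrs_str
  exact pv_main d
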